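-- pv_equiv track=rewrite | github.com/rackerlabs/understack | scripts/argo-workflows-to-mkdocs.py | parse_depends
-- ===== SOURCE A (Python) =====
-- def parse_depends(depends):
--     if not depends:
--         return []
--     if isinstance(depends, list):
--         return depends
--     if not isinstance(depends, str):
--         raise ValueError("Invalid depends (not a string): " + str(depends))
--
--     class Tokenizer:
--         def __init__(self, input_string):
--             for op in ("||", "&&", "!", "(", ")"):
--                 input_string = input_string.replace(op, " " + op + " ")
--             self.tokens = input_string.split()
--             self.position = 0
--
--         def consume(self):
--             if self.position < len(self.tokens):
--                 token = self.tokens[self.position]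
--                 self.position += 1
--                 return token
--             else:
--                 return None
--
--         def peek(self):
--             if self.position < len(self.tokens):
--                 return self.tokens[self.position]
--             else:
--                 return None
--
--     class Parser:
--         def __init__(self, tokenizer):
--             self.tokenizer = tokenizer
--             self.term_prefixes = []
--
--         def pr(self, *args):
--             pass
--
--         def parse_expression(self):
--             token = self.tokenizer.peek()
--             if token == "(":
--                 self.parse_parentheses()
--             elif token == "!":
--                 self.parse_not()
--             else:
--                 self.parse_term()
--
--         def parse_term(self):
--             token = self.tokenizer.consume()
--             if token is None or token in ("&&", "||", "!", ")"):
--                 raise ValueError("Unexpected token: " + str(token))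
--             self.term_prefixes.append(token.split(".")[0])
--             self.pr(f"term({token})")
--
--         def parse_parentheses(self):
--             self.pr("(")
--             self.tokenizer.consume()  # Consume '('
--             self.parse_or()
--             if self.tokenizer.consume() != ")":
--                 raise ValueError("Missing closing parenthesis")
--             self.pr(")")
--
--         def parse_not(self):
--             self.tokenizer.consume()  # Consume 'NOT'
--             self.pr("not ")
--             self.parse_expression()
--
--         def parse_and(self):
--             # TODO: this doesn't make sense, the variable was unused
--             _ = self.parse_expression()
--             while self.tokenizer.peek() == "&&":
--                 self.pr(" and ")
--                 self.tokenizer.consume()  # Consume 'AND'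
--                 self.parse_expression()
--
--         def parse_or(self):
--             # TODO: this doesn't make sense, the variable was unused
--             _ = self.parse_and()
--             while self.tokenizer.peek() == "||":
--                 self.pr(" or ")
--                 self.tokenizer.consume()  # Consume 'OR'
--                 self.parse_and()
--
--     tokenizer = Tokenizer(depends)
--     parser = Parser(tokenizer)
--     parser.parse_or()
--     return list(dict.fromkeys(parser.term_prefixes))
-- ===== SOURCE B (Python) =====
-- def parse_depends(depends):
--     if not depends:
--         return []
--     if isinstance(depends, list):
--         return depends
--     if not isinstance(depends, str):
--         raise ValueError("Invalid depends (not a string): " + str(depends))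
--
--     s = depends
--     for op in ("||", "&&", "!", "(", ")"):
--         s = s.replace(op, " " + op + " ")
--     tokens = s.split()
--
--     prefixes = []
--     depth = 0
--     expect_operand = True
--     i = 0
--     while True:
--         tok = tokens[i] if i < len(tokens) else None
--         if expect_operand:
--             if tok == "(":
--                 depth += 1
--             elif tok == "!":
--                 pass
--             elif tok is None or tok in ("&&", "||", ")"):
--                 raise ValueError("Unexpected token: " + str(tok))
--             else:
--                 prefixes.append(tok.split(".")[0])
--                 expect_operand = False
--             i += 1
--         elif tok in ("&&", "||"):
--             expect_operand = True
--             i += 1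
--         elif depth > 0:
--             if tok == ")":
--                 depth -= 1
--                 i += 1
--             else:
--                 raise ValueError("Missing closing parenthesis")
--         else:
--             break  # top-level expression complete; trailing tokens ignored (as in A)
--     return list(dict.fromkeys(prefixes))
-- ===== Notes on version B (the rewrite author's own statement) =====
-- stated objective: simpler
-- what changed: Replaced A's recursive-descent parser (a Tokenizer class plus a Parser class with mutually recursive parse_or/parse_and/parse_expression/parse_term/parse_parentheses/parse_not methods) by a single non-recursive linear scan over the tokens that keeps only an expect-operand flag and a parenthesis-depth counter, collecting the same prefixes in the same order, raising the same ValueError messages at the same points, and deduplicating with dict.fromkeys.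
import Mathlib
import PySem

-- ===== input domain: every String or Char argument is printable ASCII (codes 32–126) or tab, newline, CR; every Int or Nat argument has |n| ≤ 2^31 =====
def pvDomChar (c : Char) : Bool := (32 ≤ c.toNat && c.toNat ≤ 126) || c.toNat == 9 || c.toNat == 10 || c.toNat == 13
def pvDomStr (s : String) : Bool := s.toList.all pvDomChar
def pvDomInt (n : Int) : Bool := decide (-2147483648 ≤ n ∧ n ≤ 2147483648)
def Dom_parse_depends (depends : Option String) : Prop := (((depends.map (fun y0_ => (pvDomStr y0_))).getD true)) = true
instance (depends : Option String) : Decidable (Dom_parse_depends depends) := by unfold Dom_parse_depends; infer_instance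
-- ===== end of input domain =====

-- B replaces A's recursive-descent parser (parse_or/parse_and/parse_expression call tree over a
-- Tokenizer/Parser class pair) by a single non-recursive linear scan: one loop over the tokens
-- keeping only an expect-operand flag and a parenthesis-depth counter (objective: simpler, same
-- cost).  The ports agree even on A's error paths (both return [] there), so the equality proof
-- below is unconditional; Pre_ marks where Python A returns normally (ValueError elsewhere).

-- ===== PORT A =====
-- shared tokenizer: s.replace(op, " "+op+" ") for each op, then whitespace split (B's python does the same)
def pvTokens (s : String) : List String :=
  PySem.Str.split₀
    (PySem.Str.replace
      (PySem.Str.replace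
        (PySem.Str.replace
          (PySem.Str.replace
            (PySem.Str.replace s "||" " || ")
            "&&" " && ")
          "!" " ! ")
        "(" " ( ")
      ")" " ) ")

-- token.split(".")[0]
def pvPrefix (t : String) : String := ((PySem.Str.split? t ".").getD []).headD ""

-- A's Parser, state = (term_prefixes so far, remaining tokens); none = ValueError.
-- The `if h : …` guards are totality guards only: each parser consumes tokens, so they always pass
-- on the actual results (proved in aExpr_consume below).
mutual
def aExpr (acc : List String) (ts : List String) : Option (List String × List String) :=
  match ts with
  | [] => none  -- parse_term: consume() is None → ValueError
  | t :: ts1 =>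
      if t = "(" then
        match aOr acc ts1 with
        | some (a, r) =>
            match r with
            | ")" :: r1 => some (a, r1)
            | _ => none  -- "Missing closing parenthesis"
        | none => none
      else if t = "!" then aExpr acc ts1
      else if t = "&&" ∨ t = "||" ∨ t = ")" then none  -- "Unexpected token"
      else some (acc ++ [pvPrefix t], ts1)
termination_by ts.length * 8
def aAndLoop (acc : List String) (ts : List String) : Option (List String × List String) :=
  match ts with
  | t :: ts1 =>
      if t = "&&" then
        match aExpr acc ts1 with
        | some (a, r) => if h : r.length < ts1.length then aAndLoop a r else none
        | none => none
      else some (acc, t :: ts1)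
  | [] => some (acc, [])
termination_by ts.length * 8 + 1
def aAnd (acc : List String) (ts : List String) : Option (List String × List String) :=
  match aExpr acc ts with
  | some (a, r) => if h : r.length < ts.length then aAndLoop a r else none
  | none => none
termination_by ts.length * 8 + 2
def aOrLoop (acc : List String) (ts : List String) : Option (List String × List String) :=
  match ts with
  | t :: ts1 =>
      if t = "||" then
        match aAnd acc ts1 with
        | some (a, r) => if h : r.length < ts1.length then aOrLoop a r else none
        | none => none
      else some (acc, t :: ts1)
  | [] => some (acc, [])
termination_by ts.length * 8 + 3
def aOr (acc : List String) (ts : List String) : Option (List String × List String) :=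
  match aAnd acc ts with
  | some (a, r) => if h : r.length < ts.length then aOrLoop a r else none
  | none => none
termination_by ts.length * 8 + 4
end

def parse_depends (depends : Option String) : List String :=
  match depends with
  | none => []
  | some s =>
      if s = "" then []
      else
        match aOr [] (pvTokens s) with
        | some (a, _) => PySem.List.dedup a  -- list(dict.fromkeys(prefixes))
        | none => []  -- ValueError in Python (excluded by Pre_)

-- ===== PORT B =====
-- B's while-loop as structural recursion on the remaining tokens; state = (expect_operand flag,
-- paren depth, prefixes so far); none = ValueError.  The loop either consumes a token or breaks,
-- so recursion on the token list is exact.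
def bScan (expectOperand : Bool) (depth : Nat) (acc : List String) (ts : List String) :
    Option (List String) :=
  match ts with
  | [] =>
      if expectOperand then none          -- "Unexpected token: None"
      else if 0 < depth then none          -- "Missing closing parenthesis"
      else some acc                        -- break
  | t :: ts1 =>
      if expectOperand then
        if t = "(" then bScan true (depth + 1) acc ts1
        else if t = "!" then bScan true depth acc ts1
        else if t = "&&" ∨ t = "||" ∨ t = ")" then none  -- "Unexpected token"
        else bScan false depth (acc ++ [pvPrefix t]) ts1
      else if t = "&&" ∨ t = "||" then bScan true depth acc ts1
      else if 0 < depth then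
        if t = ")" then bScan false (depth - 1) acc ts1
        else none                          -- "Missing closing parenthesis"
      else some acc                        -- break; trailing tokens ignored

def parse_depends_alt (depends : Option String) : List String :=
  match depends with
  | none => []
  | some s =>
      if s = "" then []
      else
        match bScan true 0 [] (pvTokens s) with
        | some a => PySem.List.dedup a
        | none => []

-- ===== PRECONDITION & SPEC =====
-- Pre_: exactly the inputs on which Python A returns normally (falsy input, or the token list is
-- accepted by the depends-expression grammar); elsewhere A raises ValueError.  The grammar is
-- LL(1), so acceptance is a closed-form linear scan over the tokens: chkRun carries only
-- "expecting an operand / an operator" and the open-parenthesis depth; a token that ends the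
-- top-level or-chain (depth 0, operator expected) accepts with trailing tokens ignored, as in A.
def chkRun (expectOp : Bool) (depth : Nat) (ts : List String) : Bool :=
  match ts with
  | [] => if expectOp then depth = 0 else false
  | t :: ts1 =>
      if expectOp then
        if t = "&&" ∨ t = "||" then chkRun false depth ts1
        else if t = ")" then (if depth = 0 then true else chkRun true (depth - 1) ts1)
        else depth = 0
      else
        if t = "!" then chkRun false depth ts1
        else if t = "(" then chkRun false (depth + 1) ts1
        else if t = "&&" ∨ t = "||" ∨ t = ")" then false
        else chkRun true depth ts1

def Pre_parse_depends (depends : Option String) : Prop :=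
  ((depends.map (fun s => s == "" || chkRun false 0 (pvTokens s))).getD true) = true
instance (depends : Option String) : Decidable (Pre_parse_depends depends) := by
  unfold Pre_parse_depends; infer_instance

def pvWitness_parse_depends : Option String := some "a.b && (c || !d)"

def Spec_parse_depends (depends : Option String) (out : List String) : Prop :=
  out = parse_depends_alt depends
instance (depends : Option String) (out : List String) : Decidable (Spec_parse_depends depends out) := by
  unfold Spec_parse_depends; infer_instance

-- ===== CLAIM (what is proved, stated in full; the proofs are below) =====
def Claim_equal_parse_depends : Prop := ∀ (depends : Option String), Dom_parse_depends depends → Pre_parse_depends depends → Spec_parse_depends depends (parse_depends depends)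

-- ===== LEMMAS AND PROOFS =====

-- A's parser consumes: successful sub-parses strictly shrink the token list, and the
-- and-loop / or-loop never stop in front of their own operator.
theorem aFacts (n : Nat) : ∀ ts : List String, ts.length ≤ n → ∀ acc : List String,
    (∀ a r, aExpr acc ts = some (a, r) → r.length < ts.length) ∧
    (∀ a r, aAndLoop acc ts = some (a, r) → r.length ≤ ts.length ∧ r.head? ≠ some "&&") ∧
    (∀ a r, aOrLoop acc ts = some (a, r) → r.length ≤ ts.length ∧ r.head? ≠ some "||") := by
  induction n with
  | zero =>
      intro ts hts acc
      have hnil : ts = [] := List.eq_nil_of_length_eq_zero (Nat.le_zero.mp hts)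
      subst hnil
      refine ⟨?_, ?_, ?_⟩ <;> intro a r h
      · rw [aExpr.eq_def] at h; simp at h
      · rw [aAndLoop.eq_def] at h; simp at h; simp [h.2]
      · rw [aOrLoop.eq_def] at h; simp at h; simp [h.2]
  | succ n ih =>
      intro ts hts acc
      have hAnd : ∀ ts' : List String, ts'.length ≤ n → ∀ acc' a r,
          aAnd acc' ts' = some (a, r) → r.length < ts'.length ∧ r.head? ≠ some "&&" := by
        intro ts' hlen acc' a r h
        rw [aAnd.eq_def] at h
        cases hE : aExpr acc' ts' with
        | none => rw [hE] at h; exact absurd h (by simp)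
        | some p =>
            obtain ⟨a0, r0⟩ := p
            rw [hE] at h
            have hr0 := (ih ts' hlen acc').1 a0 r0 hE
            simp only [dif_pos hr0] at h
            have := (ih r0 (by omega) a0).2.1 a r h
            exact ⟨by omega, this.2⟩
      have hOr : ∀ ts' : List String, ts'.length ≤ n → ∀ acc' a r,
          aOr acc' ts' = some (a, r) → r.length < ts'.length := by
        intro ts' hlen acc' a r h
        rw [aOr.eq_def] at h
        cases hE : aAnd acc' ts' with
        | none => rw [hE] at h; exact absurd h (by simp)
        | some p =>
            obtain ⟨a0, r0⟩ := p
            rw [hE] at h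
            have hr0 := (hAnd ts' hlen acc' a0 r0 hE).1
            simp only [dif_pos hr0] at h
            have := (ih r0 (by omega) a0).2.2 a r h
            omega
      refine ⟨?_, ?_, ?_⟩
      · -- aExpr
        intro a r h
        rw [aExpr.eq_def] at h
        cases ts with
        | nil => exact absurd h (by simp)
        | cons t ts1 =>
            have hlen1 : ts1.length ≤ n := by simpa using hts
            simp only [] at h
            split_ifs at h with h1 h2 h3
            · -- t = "("
              cases hO : aOr acc ts1 with
              | none => rw [hO] at h; exact absurd h (by simp)
              | some p =>
                  obtain ⟨a0, r0⟩ := p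
                  rw [hO] at h
                  have hr0 := hOr ts1 hlen1 acc a0 r0 hO
                  cases r0 with
                  | nil => exact absurd h (by simp)
                  | cons u r1 =>
                      by_cases hu : u = ")"
                      · subst hu; simp at h; obtain ⟨h4, h5⟩ := h; subst h5
                        simp at hr0 ⊢; omega
                      · simp [hu] at h
            · -- t = "!"
              have := (ih ts1 hlen1 acc).1 a r h
              simp; omega
            · simp only [Option.some.injEq, Prod.mk.injEq] at h
              obtain ⟨h4, h5⟩ := h; subst h5; simp
      · -- aAndLoop
        intro a r h
        rw [aAndLoop.eq_def] at h
        cases ts with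
        | nil => simp at h; simp [h.2]
        | cons t ts1 =>
            have hlen1 : ts1.length ≤ n := by simpa using hts
            simp only [] at h
            split_ifs at h with h1
            · cases hE : aExpr acc ts1 with
              | none => rw [hE] at h; exact absurd h (by simp)
              | some p =>
                  obtain ⟨a0, r0⟩ := p
                  rw [hE] at h
                  have hr0 := (ih ts1 hlen1 acc).1 a0 r0 hE
                  simp only [dif_pos hr0] at h
                  have := (ih r0 (by omega) a0).2.1 a r h
                  refine ⟨by simp; omega, this.2⟩
            · simp at h; obtain ⟨h4, h5⟩ := h; subst h5
              refine ⟨by simp, by simp [h1]⟩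
      · -- aOrLoop
        intro a r h
        rw [aOrLoop.eq_def] at h
        cases ts with
        | nil => simp at h; simp [h.2]
        | cons t ts1 =>
            have hlen1 : ts1.length ≤ n := by simpa using hts
            simp only [] at h
            split_ifs at h with h1
            · cases hE : aAnd acc ts1 with
              | none => rw [hE] at h; exact absurd h (by simp)
              | some p =>
                  obtain ⟨a0, r0⟩ := p
                  rw [hE] at h
                  have hr0 := (hAnd ts1 hlen1 acc a0 r0 hE).1
                  simp only [dif_pos hr0] at h
                  have := (ih r0 (by omega) a0).2.2 a r h
                  refine ⟨by simp; omega, this.2⟩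
            · simp at h; obtain ⟨h4, h5⟩ := h; subst h5
              refine ⟨by simp, by simp [h1]⟩

theorem aExpr_consume (acc ts a r : List String) (h : aExpr acc ts = some (a, r)) :
    r.length < ts.length := (aFacts ts.length ts le_rfl acc).1 a r h

theorem aAnd_fact (acc ts a r : List String) (h : aAnd acc ts = some (a, r)) :
    r.length < ts.length ∧ r.head? ≠ some "&&" := by
  rw [aAnd.eq_def] at h
  cases hE : aExpr acc ts with
  | none => rw [hE] at h; exact absurd h (by simp)
  | some p =>
      obtain ⟨a0, r0⟩ := p
      rw [hE] at h
      have hr0 := aExpr_consume acc ts a0 r0 hE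
      simp only [dif_pos hr0] at h
      have := (aFacts r0.length r0 le_rfl a0).2.1 a r h
      exact ⟨by omega, this.2⟩

-- aOr's result never starts with an operator (needed only for the very top level)
theorem aOr_head (acc ts a r : List String) (h : aOr acc ts = some (a, r)) :
    r.head? ≠ some "&&" ∧ r.head? ≠ some "||" := by
  rw [aOr.eq_def] at h
  cases hA : aAnd acc ts with
  | none => rw [hA] at h; exact absurd h (by simp)
  | some p =>
      obtain ⟨a0, r0⟩ := p
      rw [hA] at h
      obtain ⟨hr0, hh0⟩ := aAnd_fact acc ts a0 r0 hA
      simp only [dif_pos hr0] at h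
      -- induction over the or-loop, carrying "head ≠ &&"
      clear hA
      have main : ∀ n : Nat, ∀ ts' : List String, ts'.length ≤ n → ∀ acc' a' r',
          ts'.head? ≠ some "&&" → aOrLoop acc' ts' = some (a', r') →
          r'.head? ≠ some "&&" ∧ r'.head? ≠ some "||" := by
        intro n
        induction n with
        | zero =>
            intro ts' hl acc' a' r' hh hL
            have : ts' = [] := List.eq_nil_of_length_eq_zero (Nat.le_zero.mp hl)
            subst this
            rw [aOrLoop.eq_def] at hL; simp at hL
            simp [hL.2]
        | succ n ih =>
            intro ts' hl acc' a' r' hh hL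
            rw [aOrLoop.eq_def] at hL
            cases ts' with
            | nil => simp at hL; simp [hL.2]
            | cons t ts1 =>
                simp only [] at hL
                split_ifs at hL with h1
                · cases hA2 : aAnd acc' ts1 with
                  | none => rw [hA2] at hL; exact absurd hL (by simp)
                  | some q =>
                      obtain ⟨a1, r1⟩ := q
                      rw [hA2] at hL
                      obtain ⟨hr1, hh1⟩ := aAnd_fact acc' ts1 a1 r1 hA2
                      have hr1' : r1.length < ts1.length := hr1
                      simp only [dif_pos hr1'] at hL
                      exact ih r1 (by simp at hl; omega) a1 a' r' hh1 hL
                · simp at hL; obtain ⟨h4, h5⟩ := hL; subst h5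
                  simp at hh ⊢; exact ⟨hh, h1⟩
      exact main r0.length r0 le_rfl a0 a r hh0 h

-- THE SIMULATION: B's flat state machine tracks A's recursive descent step for step.
-- State correspondence: "inside aExpr/aAnd/aOr at paren depth d" = bScan true d;
-- "between sub-expressions of an and/or chain at depth d" = bScan false d.
theorem simAll (n : Nat) : ∀ ts : List String, ts.length ≤ n → ∀ acc : List String, ∀ d : Nat,
    (∀ a r, aExpr acc ts = some (a, r) → bScan true d acc ts = bScan false d a r) ∧
    (aExpr acc ts = none → bScan true d acc ts = none) ∧
    (∀ a r, aAndLoop acc ts = some (a, r) → bScan false d acc ts = bScan false d a r) ∧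
    (aAndLoop acc ts = none → bScan false d acc ts = none) ∧
    (∀ a r, aOrLoop acc ts = some (a, r) → bScan false d acc ts = bScan false d a r) ∧
    (aOrLoop acc ts = none → bScan false d acc ts = none) := by
  induction n with
  | zero =>
      intro ts hts acc d
      have hnil : ts = [] := List.eq_nil_of_length_eq_zero (Nat.le_zero.mp hts)
      subst hnil
      refine ⟨?_, ?_, ?_, ?_, ?_, ?_⟩
      · intro a r h; rw [aExpr.eq_def] at h; simp at h
      · intro _; simp [bScan]
      · intro a r h; rw [aAndLoop.eq_def] at h; simp at h
        obtain ⟨h1, h2⟩ := h; subst h1; subst h2; rfl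
      · intro h; rw [aAndLoop.eq_def] at h; simp at h
      · intro a r h; rw [aOrLoop.eq_def] at h; simp at h
        obtain ⟨h1, h2⟩ := h; subst h1; subst h2; rfl
      · intro h; rw [aOrLoop.eq_def] at h; simp at h
  | succ n ih =>
      intro ts hts acc d
      -- derived facts for aAnd (= aExpr then aAndLoop) on lists of length ≤ n
      have hAnd : ∀ ts' : List String, ts'.length ≤ n → ∀ acc' d',
          (∀ a r, aAnd acc' ts' = some (a, r) → bScan true d' acc' ts' = bScan false d' a r) ∧
          (aAnd acc' ts' = none → bScan true d' acc' ts' = none) := by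
        intro ts' hlen acc' d'
        constructor
        · intro a r h
          rw [aAnd.eq_def] at h
          cases hE : aExpr acc' ts' with
          | none => rw [hE] at h; exact absurd h (by simp)
          | some p =>
              obtain ⟨a0, r0⟩ := p
              rw [hE] at h
              have hr0 := aExpr_consume acc' ts' a0 r0 hE
              simp only [dif_pos hr0] at h
              rw [(ih ts' hlen acc' d').1 a0 r0 hE]
              exact (ih r0 (by omega) a0 d').2.2.1 a r h
        · intro h
          rw [aAnd.eq_def] at h
          cases hE : aExpr acc' ts' with
          | none => exact (ih ts' hlen acc' d').2.1 hE
          | some p =>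
              obtain ⟨a0, r0⟩ := p
              rw [hE] at h
              have hr0 := aExpr_consume acc' ts' a0 r0 hE
              simp only [dif_pos hr0] at h
              rw [(ih ts' hlen acc' d').1 a0 r0 hE]
              exact (ih r0 (by omega) a0 d').2.2.2.1 h
      -- derived facts for aOr (= aAnd then aOrLoop) on lists of length ≤ n
      have hOr : ∀ ts' : List String, ts'.length ≤ n → ∀ acc' d',
          (∀ a r, aOr acc' ts' = some (a, r) → bScan true d' acc' ts' = bScan false d' a r) ∧
          (aOr acc' ts' = none → bScan true d' acc' ts' = none) := by
        intro ts' hlen acc' d'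
        constructor
        · intro a r h
          rw [aOr.eq_def] at h
          cases hA : aAnd acc' ts' with
          | none => rw [hA] at h; exact absurd h (by simp)
          | some p =>
              obtain ⟨a0, r0⟩ := p
              rw [hA] at h
              have hr0 := (aAnd_fact acc' ts' a0 r0 hA).1
              simp only [dif_pos hr0] at h
              rw [(hAnd ts' hlen acc' d').1 a0 r0 hA]
              exact (ih r0 (by omega) a0 d').2.2.2.2.1 a r h
        · intro h
          rw [aOr.eq_def] at h
          cases hA : aAnd acc' ts' with
          | none => exact (hAnd ts' hlen acc' d').2 hA
          | some p =>
              obtain ⟨a0, r0⟩ := p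
              rw [hA] at h
              have hr0 := (aAnd_fact acc' ts' a0 r0 hA).1
              simp only [dif_pos hr0] at h
              rw [(hAnd ts' hlen acc' d').1 a0 r0 hA]
              exact (ih r0 (by omega) a0 d').2.2.2.2.2 h
      refine ⟨?_, ?_, ?_, ?_, ?_, ?_⟩
      · -- aExpr success
        intro a r h
        rw [aExpr.eq_def] at h
        cases ts with
        | nil => exact absurd h (by simp)
        | cons t ts1 =>
            have hlen1 : ts1.length ≤ n := by simpa using hts
            simp only [] at h
            split_ifs at h with h1 h2 h3
            · -- "(" : descend with depth+1, then the ")" step brings depth back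
              subst h1
              cases hO : aOr acc ts1 with
              | none => rw [hO] at h; exact absurd h (by simp)
              | some p =>
                  obtain ⟨a0, r0⟩ := p
                  rw [hO] at h
                  cases r0 with
                  | nil => exact absurd h (by simp)
                  | cons u r1 =>
                      by_cases hu : u = ")"
                      · subst hu
                        simp only [Option.some.injEq, Prod.mk.injEq] at h
                        rw [h.1, h.2] at hO
                        have step : bScan true d acc ("(" :: ts1) = bScan true (d + 1) acc ts1 := by
                          simp [bScan]
                        rw [step, (hOr ts1 hlen1 acc (d+1)).1 a (")" :: r) hO]
                        simp [bScan]
                      · simp [hu] at h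
            · -- "!"
              subst h2
              have step : bScan true d acc ("!" :: ts1) = bScan true d acc ts1 := by
                simp [bScan, h1]
              rw [step]
              exact (ih ts1 hlen1 acc d).1 a r h
            · -- plain term
              simp only [Option.some.injEq, Prod.mk.injEq] at h
              rw [← h.1, ← h.2]
              simp [bScan, h1, h2, h3]
      · -- aExpr failure
        intro h
        rw [aExpr.eq_def] at h
        cases ts with
        | nil => simp [bScan]
        | cons t ts1 =>
            have hlen1 : ts1.length ≤ n := by simpa using hts
            simp only [] at h
            split_ifs at h with h1 h2 h3
            · -- "("
              subst h1
              have step : bScan true d acc ("(" :: ts1) = bScan true (d + 1) acc ts1 := by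
                simp [bScan]
              rw [step]
              cases hO : aOr acc ts1 with
              | none => exact (hOr ts1 hlen1 acc (d+1)).2 hO
              | some p =>
                  obtain ⟨a0, r0⟩ := p
                  rw [hO] at h
                  rw [(hOr ts1 hlen1 acc (d+1)).1 a0 r0 hO]
                  obtain ⟨hh1, hh2⟩ := aOr_head acc ts1 a0 r0 hO
                  cases r0 with
                  | nil => simp [bScan]
                  | cons u r1 =>
                      by_cases hu : u = ")"
                      · subst hu; simp at h
                      · simp at hh1 hh2
                        simp [bScan, hh1, hh2, hu]
            · -- "!"
              subst h2
              have step : bScan true d acc ("!" :: ts1) = bScan true d acc ts1 := by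
                simp [bScan, h1]
              rw [step]
              exact (ih ts1 hlen1 acc d).2.1 h
            · -- operator / ")" where operand expected
              simp [bScan, h1, h2, h3]
      · -- aAndLoop success
        intro a r h
        rw [aAndLoop.eq_def] at h
        cases ts with
        | nil => simp at h; obtain ⟨h1, h2⟩ := h; subst h1; subst h2; rfl
        | cons t ts1 =>
            have hlen1 : ts1.length ≤ n := by simpa using hts
            simp only [] at h
            split_ifs at h with h1
            · subst h1
              cases hE : aExpr acc ts1 with
              | none => rw [hE] at h; exact absurd h (by simp)
              | some p =>
                  obtain ⟨a0, r0⟩ := p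
                  rw [hE] at h
                  have hr0 := aExpr_consume acc ts1 a0 r0 hE
                  simp only [dif_pos hr0] at h
                  have step : bScan false d acc ("&&" :: ts1) = bScan true d acc ts1 := by
                    simp [bScan]
                  rw [step, (ih ts1 hlen1 acc d).1 a0 r0 hE]
                  exact (ih r0 (by omega) a0 d).2.2.1 a r h
            · simp at h; obtain ⟨h4, h5⟩ := h; subst h4; subst h5; rfl
      · -- aAndLoop failure
        intro h
        rw [aAndLoop.eq_def] at h
        cases ts with
        | nil => simp at h
        | cons t ts1 =>
            have hlen1 : ts1.length ≤ n := by simpa using hts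
            simp only [] at h
            split_ifs at h with h1
            · subst h1
              have step : bScan false d acc ("&&" :: ts1) = bScan true d acc ts1 := by
                simp [bScan]
              rw [step]
              cases hE : aExpr acc ts1 with
              | none => exact (ih ts1 hlen1 acc d).2.1 hE
              | some p =>
                  obtain ⟨a0, r0⟩ := p
                  rw [hE] at h
                  have hr0 := aExpr_consume acc ts1 a0 r0 hE
                  simp only [dif_pos hr0] at h
                  rw [(ih ts1 hlen1 acc d).1 a0 r0 hE]
                  exact (ih r0 (by omega) a0 d).2.2.2.1 h
      · -- aOrLoop success
        intro a r h
        rw [aOrLoop.eq_def] at h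
        cases ts with
        | nil => simp at h; obtain ⟨h1, h2⟩ := h; subst h1; subst h2; rfl
        | cons t ts1 =>
            have hlen1 : ts1.length ≤ n := by simpa using hts
            simp only [] at h
            split_ifs at h with h1
            · subst h1
              cases hA : aAnd acc ts1 with
              | none => rw [hA] at h; exact absurd h (by simp)
              | some p =>
                  obtain ⟨a0, r0⟩ := p
                  rw [hA] at h
                  have hr0 := (aAnd_fact acc ts1 a0 r0 hA).1
                  simp only [dif_pos hr0] at h
                  have step : bScan false d acc ("||" :: ts1) = bScan true d acc ts1 := by
                    simp [bScan]
                  rw [step, (hAnd ts1 hlen1 acc d).1 a0 r0 hA]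
                  exact (ih r0 (by omega) a0 d).2.2.2.2.1 a r h
            · simp at h; obtain ⟨h4, h5⟩ := h; subst h4; subst h5; rfl
      · -- aOrLoop failure
        intro h
        rw [aOrLoop.eq_def] at h
        cases ts with
        | nil => simp at h
        | cons t ts1 =>
            have hlen1 : ts1.length ≤ n := by simpa using hts
            simp only [] at h
            split_ifs at h with h1
            · subst h1
              have step : bScan false d acc ("||" :: ts1) = bScan true d acc ts1 := by
                simp [bScan]
              rw [step]
              cases hA : aAnd acc ts1 with
              | none => exact (hAnd ts1 hlen1 acc d).2 hA
              | some p =>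
                  obtain ⟨a0, r0⟩ := p
                  rw [hA] at h
                  have hr0 := (aAnd_fact acc ts1 a0 r0 hA).1
                  simp only [dif_pos hr0] at h
                  rw [(hAnd ts1 hlen1 acc d).1 a0 r0 hA]
                  exact (ih r0 (by omega) a0 d).2.2.2.2.2 h

-- aOr at depth 0 against the whole machine
theorem bScan_eq_aOr (ts : List String) :
    bScan true 0 [] ts = (aOr [] ts).map Prod.fst := by
  have hTop : ∀ a r, aOr [] ts = some (a, r) → bScan true 0 [] ts = bScan false 0 a r := by
    intro a r hO
    rw [aOr.eq_def] at hO
    cases hA : aAnd [] ts with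
    | none => rw [hA] at hO; exact absurd hO (by simp)
    | some q =>
        obtain ⟨a0, r0⟩ := q
        rw [hA] at hO
        have hr0 := (aAnd_fact [] ts a0 r0 hA).1
        simp only [dif_pos hr0] at hO
        have h2 : bScan true 0 [] ts = bScan false 0 a0 r0 := by
          rw [aAnd.eq_def] at hA
          cases hE : aExpr [] ts with
          | none => rw [hE] at hA; exact absurd hA (by simp)
          | some q2 =>
              obtain ⟨a1, r1⟩ := q2
              rw [hE] at hA
              have hr1 := aExpr_consume [] ts a1 r1 hE
              simp only [dif_pos hr1] at hA
              rw [(simAll ts.length ts le_rfl [] 0).1 a1 r1 hE]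
              exact (simAll r1.length r1 le_rfl a1 0).2.2.1 a0 r0 hA
        rw [h2]
        exact (simAll r0.length r0 le_rfl a0 0).2.2.2.2.1 a r hO
  cases hO : aOr [] ts with
  | none =>
      -- failure side: unfold aOr into aExpr/aAndLoop/aOrLoop and reuse simAll
      rw [aOr.eq_def] at hO
      cases hA : aAnd [] ts with
      | none =>
          rw [aAnd.eq_def] at hA
          cases hE : aExpr [] ts with
          | none => simpa using (simAll ts.length ts le_rfl [] 0).2.1 hE
          | some p =>
              obtain ⟨a0, r0⟩ := p
              rw [hE] at hA
              have hr0 := aExpr_consume [] ts a0 r0 hE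
              simp only [dif_pos hr0] at hA
              rw [(simAll ts.length ts le_rfl [] 0).1 a0 r0 hE]
              simpa using (simAll r0.length r0 le_rfl a0 0).2.2.2.1 hA
      | some p =>
          obtain ⟨a0, r0⟩ := p
          rw [hA] at hO
          have hr0 := (aAnd_fact [] ts a0 r0 hA).1
          simp only [dif_pos hr0] at hO
          have h1 : bScan true 0 [] ts = bScan false 0 a0 r0 := by
            rw [aAnd.eq_def] at hA
            cases hE : aExpr [] ts with
            | none => rw [hE] at hA; exact absurd hA (by simp)
            | some q =>
                obtain ⟨a1, r1⟩ := q
                rw [hE] at hA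
                have hr1 := aExpr_consume [] ts a1 r1 hE
                simp only [dif_pos hr1] at hA
                rw [(simAll ts.length ts le_rfl [] 0).1 a1 r1 hE]
                exact (simAll r1.length r1 le_rfl a1 0).2.2.1 a0 r0 hA
          rw [h1]
          simpa using (simAll r0.length r0 le_rfl a0 0).2.2.2.2.2 hO
  | some p =>
      obtain ⟨a, r⟩ := p
      rw [hTop a r hO]
      -- the machine at depth 0, operator expected, next token not an operator: break with `a`
      obtain ⟨hh1, hh2⟩ := aOr_head [] ts a r hO
      cases r with
      | nil => simp [bScan]
      | cons u r1 =>
          simp at hh1 hh2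
          simp [bScan, hh1, hh2]

theorem total_eq (depends : Option String) : parse_depends depends = parse_depends_alt depends := by
  cases depends with
  | none => rfl
  | some s =>
      unfold parse_depends parse_depends_alt
      by_cases hs : s = ""
      · simp [hs]
      · simp only [hs, if_false, bScan_eq_aOr]
        cases aOr [] (pvTokens s) with
        | none => rfl
        | some p => rfl

-- ===== VERDICT (by name: the statement is the Claim_ definition above) =====
theorem parse_depends_spec : Claim_equal_parse_depends := by
  intro depends _ _
  unfold Spec_parse_depends
  exact total_eq depends
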